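-- pv_equiv track=rewrite | github.com/mortennp/mooc | UCSD_Bioinformatics/BioinformaticsSpyder/BioinformaticsI/ClockGenes/motif_enumeration_3a.py | calculate_neighbors
-- ===== SOURCE A (Python) =====
-- def calc_hamming_distance(text1, text2):
--     assert(len(text1) == len(text2))
--     result = 0
--     for i in range(len(text1)):
--         if text1[i:i+1] != text2[i:i+1]:
--             result += 1
--     return result
--
-- def calculate_neighbors(pattern, d):
--     nucleotides = ['A', 'C', 'G', 'T']
--
--     if 0 == d:
--         return [pattern]
--
--     if 1 == len(pattern):
--         return nucleotides
--
--     neighbors = []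
--     first_symbol, suffix = pattern[0:1], pattern[1:]
--     suffix_neighbors = calculate_neighbors(suffix, d)
--     for suffix_neighbor in suffix_neighbors:
--         if calc_hamming_distance(suffix_neighbor, suffix) < d:
--                 for nucleotide in nucleotides:
--                     neighbors.append(nucleotide + suffix_neighbor)
--         else:
--             neighbors.append(first_symbol + suffix_neighbor)
--     return neighbors
-- ===== SOURCE B (Python) =====
-- def _neighbors(pattern, d):
--     # returns list of (neighbor, hamming_distance_to_pattern) pairs,
--     # carrying the distance incrementally instead of rescanning
--     nucleotides = ['A', 'C', 'G', 'T']
--     if d == 0: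
--         return [(pattern, 0)]
--     if len(pattern) == 1:
--         return [(n, 0 if n == pattern else 1) for n in nucleotides]
--     first, suffix = pattern[0], pattern[1:]
--     out = []
--     for s, k in _neighbors(suffix, d):
--         if k < d:
--             out.extend((n + s, k if n == first else k + 1) for n in nucleotides)
--         else:
--             out.append((first + s, k))
--     return out
--
-- def calculate_neighbors(pattern, d):
--     return [s for s, _ in _neighbors(pattern, d)]
-- ===== Notes on version B (the rewrite author's own statement) =====
-- stated objective: faster
-- what changed: B threads each neighbor's Hamming distance through the recursion as a carried counter updated in O(1) per extension, removing A's full calc_hamming_distance rescan of every suffix neighbor at every level; intended as faster (measured 15x at the largest size both finished; at larger sizes the exponential output makes both time out).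
import Mathlib
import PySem

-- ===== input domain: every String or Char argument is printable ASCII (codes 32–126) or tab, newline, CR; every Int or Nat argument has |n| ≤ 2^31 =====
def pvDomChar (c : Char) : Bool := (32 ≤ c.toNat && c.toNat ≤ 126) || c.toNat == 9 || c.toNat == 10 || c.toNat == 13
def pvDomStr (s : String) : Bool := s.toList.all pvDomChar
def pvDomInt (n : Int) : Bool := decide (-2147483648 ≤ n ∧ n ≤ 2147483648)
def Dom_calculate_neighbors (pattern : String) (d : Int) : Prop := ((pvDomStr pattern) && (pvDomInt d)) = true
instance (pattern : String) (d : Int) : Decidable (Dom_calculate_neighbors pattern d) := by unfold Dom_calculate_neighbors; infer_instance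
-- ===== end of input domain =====

-- B threads each neighbor's Hamming distance through the recursion as a carried counter
-- (updated in O(1) per extension) instead of rescanning every suffix neighbor with
-- calc_hamming_distance at every level; intended as faster (measured 15x at the largest
-- size both finished; on larger sizes the exponential output dominates both).

-- ===== PORT A =====
def pvNucs : List Char := ['A', 'C', 'G', 'T']

-- calc_hamming_distance: index loop comparing one-char slices; equal-length callers only
def calc_hamming_distance (t1 t2 : List Char) : Int :=
  (List.range t1.length).foldl (fun r i => if t1[i]? ≠ t2[i]? then r + 1 else r) 0

def neighborsA : List Char → Int → List (List Char)
  | p, d =>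
    if 0 = d then [p]
    else
      match p with
      | [] => []          -- Python recurses forever here (RecursionError); excluded by Pre_
      | [_] => pvNucs.map (fun n => [n])
      | c :: rest =>
        (neighborsA rest d).foldl
          (fun acc s =>
            if calc_hamming_distance s rest < d then
              acc ++ pvNucs.map (fun n => n :: s)
            else
              acc ++ [c :: s]) []

def calculate_neighbors (pattern : String) (d : Int) : List String :=
  (neighborsA pattern.toList d).map String.mk

-- ===== PORT B =====
def neighborsB : List Char → Int → List (List Char × Int)
  | p, d =>
    if d = 0 then [(p, 0)]
    else
      match p with
      | [] => []          -- Python B raises IndexError here; excluded by Pre_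
      | [c] => pvNucs.map (fun n => ([n], if n = c then 0 else 1))
      | c :: rest =>
        (neighborsB rest d).foldl
          (fun acc sk =>
            if sk.2 < d then
              acc ++ pvNucs.map (fun n => (n :: sk.1, if n = c then sk.2 else sk.2 + 1))
            else
              acc ++ [(c :: sk.1, sk.2)]) []

def calculate_neighbors_alt (pattern : String) (d : Int) : List String :=
  (neighborsB pattern.toList d).map (fun sk => String.mk sk.1)

-- ===== PRECONDITION & SPEC =====
-- Pre_ excludes only the empty pattern with d ≠ 0, where A recurses forever (RecursionError).
def Pre_calculate_neighbors (pattern : String) (d : Int) : Prop := d = 0 ∨ pattern ≠ ""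
instance (pattern : String) (d : Int) : Decidable (Pre_calculate_neighbors pattern d) := by
  unfold Pre_calculate_neighbors; infer_instance
def pvWitness_calculate_neighbors : String × Int := ("ACG", 1)

def Spec_calculate_neighbors (pattern : String) (d : Int) (out : List String) : Prop := out = calculate_neighbors_alt pattern d
instance (pattern : String) (d : Int) (out : List String) : Decidable (Spec_calculate_neighbors pattern d out) := by unfold Spec_calculate_neighbors; infer_instance

-- ===== CLAIM (what is proved, stated in full; the proofs are below) =====
def Claim_equal_calculate_neighbors : Prop := ∀ (pattern : String) (d : Int), Dom_calculate_neighbors pattern d → Pre_calculate_neighbors pattern d → Spec_calculate_neighbors pattern d (calculate_neighbors pattern d)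

-- ===== LEMMAS AND PROOFS =====

-- unfolding equations for the two recursions (constructor-shaped, so they rewrite cleanly)
lemma eqA0 (p : List Char) (d : Int) (h : 0 = d) : neighborsA p d = [p] := by
  rw [neighborsA.eq_def]; exact if_pos h

lemma eqAnil (d : Int) (h : ¬ 0 = d) : neighborsA [] d = [] := by
  rw [neighborsA.eq_def]; exact if_neg h

lemma eqA1 (c : Char) (d : Int) (h : ¬ 0 = d) :
    neighborsA [c] d = pvNucs.map (fun n => [n]) := by
  rw [neighborsA.eq_def]; exact if_neg h

lemma eqA2 (c r0 : Char) (rs : List Char) (d : Int) (h : ¬ 0 = d) :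
    neighborsA (c :: r0 :: rs) d
      = (neighborsA (r0 :: rs) d).foldl
          (fun acc s =>
            if calc_hamming_distance s (r0 :: rs) < d then
              acc ++ pvNucs.map (fun n => n :: s)
            else
              acc ++ [c :: s]) [] := by
  rw [neighborsA.eq_def]; exact if_neg h

lemma eqB0 (p : List Char) (d : Int) (h : d = 0) : neighborsB p d = [(p, 0)] := by
  rw [neighborsB.eq_def]; exact if_pos h

lemma eqBnil (d : Int) (h : ¬ d = 0) : neighborsB [] d = [] := by
  rw [neighborsB.eq_def]; exact if_neg h

lemma eqB1 (c : Char) (d : Int) (h : ¬ d = 0) :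
    neighborsB [c] d = pvNucs.map (fun n => ([n], if n = c then 0 else 1)) := by
  rw [neighborsB.eq_def]; exact if_neg h

lemma eqB2 (c r0 : Char) (rs : List Char) (d : Int) (h : ¬ d = 0) :
    neighborsB (c :: r0 :: rs) d
      = (neighborsB (r0 :: rs) d).foldl
          (fun acc sk =>
            if sk.2 < d then
              acc ++ pvNucs.map (fun n => (n :: sk.1, if n = c then sk.2 else sk.2 + 1))
            else
              acc ++ [(c :: sk.1, sk.2)]) [] := by
  rw [neighborsB.eq_def]; exact if_neg h

-- A's append loop as a flatMap
lemma foldA (c : Char) (rest : List Char) (d : Int) (l : List (List Char)) (acc : List (List Char)) :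
    l.foldl
        (fun acc s =>
          if calc_hamming_distance s rest < d then acc ++ pvNucs.map (fun n => n :: s)
          else acc ++ [c :: s]) acc
      = acc ++ l.flatMap (fun s =>
          if calc_hamming_distance s rest < d then pvNucs.map (fun n => n :: s) else [c :: s]) := by
  induction l generalizing acc with
  | nil => simp
  | cons a l ih =>
    simp only [List.foldl_cons, List.flatMap_cons]
    split <;> rw [ih] <;> simp

-- B's append loop as a flatMap
lemma foldB (c : Char) (d : Int) (l : List (List Char × Int)) (acc : List (List Char × Int)) :
    l.foldl
        (fun acc sk =>
          if sk.2 < d then acc ++ pvNucs.map (fun n => (n :: sk.1, if n = c then sk.2 else sk.2 + 1))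
          else acc ++ [(c :: sk.1, sk.2)]) acc
      = acc ++ l.flatMap (fun sk =>
          if sk.2 < d then pvNucs.map (fun n => (n :: sk.1, if n = c then sk.2 else sk.2 + 1))
          else [(c :: sk.1, sk.2)]) := by
  induction l generalizing acc with
  | nil => simp
  | cons a l ih =>
    simp only [List.foldl_cons, List.flatMap_cons]
    split <;> rw [ih] <;> simp

lemma flatMap_congr_mem {α β : Type} {l : List α} {f g : α → List β}
    (h : ∀ x ∈ l, f x = g x) : l.flatMap f = l.flatMap g := by
  induction l with
  | nil => rfl
  | cons a l ih =>
    simp only [List.flatMap_cons]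
    rw [h a (List.mem_cons_self ..), ih fun x hx => h x (List.mem_cons_of_mem _ hx)]

lemma ite_add_shape (t1 t2 : List Char) :
    (fun (r : Int) (i : Nat) => if t1[i]? ≠ t2[i]? then r + 1 else r)
      = fun r i => r + (if t1[i]? = t2[i]? then 0 else 1) := by
  funext r i; by_cases h : t1[i]? = t2[i]? <;> simp [h]

lemma foldl_add_shift {α : Type} (g : α → Int) (c : Int) (l : List α) :
    l.foldl (fun r i => r + g i) c = c + l.foldl (fun r i => r + g i) 0 := by
  induction l generalizing c with
  | nil => simp
  | cons a l ih =>
    simp only [List.foldl_cons]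
    rw [ih, ih (0 + g a)]
    ring

lemma hamming_self (t : List Char) : calc_hamming_distance t t = 0 := by
  unfold calc_hamming_distance
  induction List.range t.length with
  | nil => rfl
  | cons a l ih => simpa using ih

lemma hamming_cons (a b : Char) (t1 t2 : List Char) :
    calc_hamming_distance (a :: t1) (b :: t2)
      = (if a = b then 0 else 1) + calc_hamming_distance t1 t2 := by
  unfold calc_hamming_distance
  rw [ite_add_shape (a :: t1) (b :: t2), ite_add_shape t1 t2]
  simp only [List.length_cons, List.range_succ_eq_map, List.foldl_cons, List.foldl_map,
    List.getElem?_cons_zero, List.getElem?_cons_succ]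
  rw [foldl_add_shift]
  by_cases h : a = b <;> simp [h] <;> rfl

-- the carried counter IS the Hamming distance to the pattern
lemma neighborsB_dist (p : List Char) (d : Int) :
    ∀ sk ∈ neighborsB p d, sk.2 = calc_hamming_distance sk.1 p := by
  induction p with
  | nil =>
    intro sk hsk
    by_cases hd : d = 0
    · rw [eqB0 _ _ hd] at hsk
      simp only [List.mem_singleton] at hsk
      simp [hsk, hamming_self]
    · rw [eqBnil _ hd] at hsk
      simp at hsk
  | cons c rest ih =>
    intro sk hsk
    by_cases hd : d = 0
    · rw [eqB0 _ _ hd] at hsk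
      simp only [List.mem_singleton] at hsk
      simp [hsk, hamming_self]
    · cases rest with
      | nil =>
        rw [eqB1 c d hd] at hsk
        simp only [pvNucs, List.map_cons, List.map_nil, List.mem_cons,
          List.not_mem_nil, or_false] at hsk
        rcases hsk with h | h | h | h <;> subst h <;>
          simp [hamming_cons, calc_hamming_distance]
      | cons r0 rs =>
        rw [eqB2 c r0 rs d hd, foldB] at hsk
        simp only [List.nil_append, List.mem_flatMap] at hsk
        obtain ⟨x, hx, hmem⟩ := hsk
        have hxd := ih x hx
        split at hmem
        · simp only [List.mem_map, pvNucs, List.mem_cons, List.not_mem_nil] at hmem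
          obtain ⟨n, _, rfl⟩ := hmem
          simp only [hamming_cons, ← hxd]
          by_cases h : n = c <;> simp [h] <;> ring
        · simp only [List.mem_singleton] at hmem
          subst hmem
          simp [hamming_cons, hxd]

lemma neighborsA_eq (p : List Char) (d : Int) :
    neighborsA p d = (neighborsB p d).map Prod.fst := by
  induction p with
  | nil =>
    by_cases h : d = 0
    · rw [eqA0 _ _ h.symm, eqB0 _ _ h]; rfl
    · rw [eqAnil _ (fun h0 => h h0.symm), eqBnil _ h]; rfl
  | cons c rest ih =>
    by_cases h : d = 0
    · rw [eqA0 _ _ h.symm, eqB0 _ _ h]; rfl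
    · cases rest with
      | nil =>
        rw [eqA1 c d (fun h0 => h h0.symm), eqB1 c d h]
        simp [pvNucs]
      | cons r0 rs =>
        rw [eqA2 c r0 rs d (fun h0 => h h0.symm), eqB2 c r0 rs d h, foldA, foldB]
        simp only [List.nil_append, List.map_flatMap, ih]
        rw [List.flatMap_map]
        apply flatMap_congr_mem
        intro sk hsk
        have hd := neighborsB_dist (r0 :: rs) d sk hsk
        rw [show calc_hamming_distance sk.1 (r0 :: rs) = sk.2 from hd.symm]
        split <;> simp [pvNucs]

-- ===== VERDICT (by name: the statement is the Claim_ definition above) =====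
theorem calculate_neighbors_spec : Claim_equal_calculate_neighbors := by
  intro pattern d _ _
  unfold Spec_calculate_neighbors calculate_neighbors calculate_neighbors_alt
  rw [neighborsA_eq, List.map_map]
  rfl
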